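-- pv_equiv track=rewrite | github.com/jasonnoy/groudingDataset | temp.py | findall_puncts
-- ===== SOURCE A (Python) =====
-- puncts = ['|', ':', ';', '@', '(', ')', '[', ']', '{', '}', '^', '\\', '/',
--           '\'', '\"', '’', '`', '?', '$', '%', '#', '!', '&', '*', '+', ',', '.'
--           ]
--
-- def findall_puncts(text):
--     caption = text
--     res = []
--     for punct in puncts:
--         beg = 0
--         while text.find(punct, beg) != -1:
--             pos = text.find(punct, beg)
--             res.append(pos)
--             beg = pos + 1
--     for p in puncts:
--         caption = caption.replace(p, '')
--     for i, c in enumerate(caption):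
--         if c != ' ':
--             break
--         res.append(0)
--     return res
-- ===== SOURCE B (Python) =====
-- PUNCTS = '|:;@()[]{}^\\/\'"\u2019`?$%#!&*+,.'
--
-- def findall_puncts(text):
--     # one pass: group positions by punctuation char, count leading spaces of the
--     # punctuation-stripped caption on the fly
--     positions = {}
--     lead = 0
--     counting = True
--     for i, c in enumerate(text):
--         if c in PUNCTS:
--             positions.setdefault(c, []).append(i)
--         elif counting and c == ' ':
--             lead += 1
--         else:
--             counting = False
--     res = []
--     for p in PUNCTS:
--         res.extend(positions.get(p, []))
--     res.extend([0] * lead)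
--     return res
-- ===== Notes on version B (the rewrite author's own statement) =====
-- stated objective: alternative
-- what changed: A scans the text 27 times with str.find (one scan per punctuation char) and then strips the caption with 27 str.replace passes; B makes a single left-to-right pass that groups positions per punctuation char in a dict and counts the stripped caption's leading spaces on the fly, then emits the groups in the fixed punctuation order.
import Mathlib
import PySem

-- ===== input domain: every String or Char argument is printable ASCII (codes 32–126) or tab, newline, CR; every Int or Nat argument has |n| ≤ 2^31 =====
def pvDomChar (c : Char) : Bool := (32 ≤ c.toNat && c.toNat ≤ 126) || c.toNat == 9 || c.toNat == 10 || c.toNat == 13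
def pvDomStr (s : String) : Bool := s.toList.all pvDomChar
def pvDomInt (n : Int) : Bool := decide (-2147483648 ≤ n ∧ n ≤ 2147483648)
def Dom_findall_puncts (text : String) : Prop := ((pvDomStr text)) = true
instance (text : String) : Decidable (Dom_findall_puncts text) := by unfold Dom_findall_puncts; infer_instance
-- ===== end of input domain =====

-- B replaces A's 27 find-scans plus 27 replace-passes by one left-to-right pass that groups
-- positions per punctuation char and counts the stripped caption's leading spaces on the fly.

-- ===== PORT A =====
def punctsA : List String :=
  ["|", ":", ";", "@", "(", ")", "[", "]", "{", "}", "^", "\\", "/",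
   "'", "\"", "’", "`", "?", "$", "%", "#", "!", "&", "*", "+", ",", "."]

-- the inner 'while text.find(punct, beg) != -1' loop; fuel s.length + 1 is enough
-- because beg strictly increases and stays ≤ len(text)
def findLoopA (s : List Char) (p : List Char) (beg : Int) : Nat → List Int
  | 0 => []
  | fuel + 1 =>
    if PySem.Chars.findFrom s p beg none ≠ -1 then
      let pos := PySem.Chars.findFrom s p beg none
      pos :: findLoopA s p (pos + 1) fuel
    else []

-- 'for i, c in enumerate(caption): if c != ' ': break; res.append(0)'
def leadZerosA : List Char → List Int
  | [] => []
  | c :: rest => if c ≠ ' ' then [] else 0 :: leadZerosA rest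

-- strings are handled on the Char-list side throughout (PySem.Chars is exact there)
def findall_puncts (text : String) : List Int :=
  let s := text.toList
  let res := punctsA.foldl (fun res p => res ++ findLoopA s p.toList 0 (s.length + 1)) []
  let caption := punctsA.foldl (fun cap p => PySem.Chars.replace cap p.toList []) s
  res ++ leadZerosA caption

-- ===== PORT B =====
def punctsB : List Char :=
  ['|', ':', ';', '@', '(', ')', '[', ']', '{', '}', '^', '\\', '/',
   '\'', '\"', '’', '`', '?', '$', '%', '#', '!', '&', '*', '+', ',', '.']

def findall_puncts_alt (text : String) : List Int :=
  let st := (PySem.List.enumerate text.toList).foldl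
    (fun (st : PySem.Dict Char (List Int) × Nat × Bool) ic =>
      if punctsB.contains ic.2 then
        (st.1.insert ic.2 (st.1.getD ic.2 [] ++ [ic.1]), st.2)
      else if st.2.2 && (ic.2 == ' ') then (st.1, (st.2.1 + 1, st.2.2))
      else (st.1, (st.2.1, false)))
    (PySem.Dict.empty, (0, true))
  (punctsB.foldl (fun res p => res ++ st.1.getD p []) []) ++ List.replicate st.2.1 0

-- ===== PRECONDITION & SPEC =====
def Spec_findall_puncts (text : String) (out : List Int) : Prop := out = findall_puncts_alt text
instance (text : String) (out : List Int) : Decidable (Spec_findall_puncts text out) := by unfold Spec_findall_puncts; infer_instance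

-- ===== CLAIM (what is proved, stated in full; the proofs are below) =====
def Claim_equal_findall_puncts : Prop := ∀ (text : String), Dom_findall_puncts text → Spec_findall_puncts text (findall_puncts text)

-- ===== LEMMAS AND PROOFS =====

-- the common description of both per-char position lists: positions (from base b) of c in t
def occ (c : Char) : List Char → Int → List Int
  | [], _ => []
  | a :: t, b => if a = c then b :: occ c t (b + 1) else occ c t (b + 1)

theorem occ_of_not_mem {c : Char} {t : List Char} (h : c ∉ t) (b : Int) : occ c t b = [] := by
  induction t generalizing b with
  | nil => rfl
  | cons a t ih =>
    simp only [occ]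
    rw [if_neg (by rintro rfl; exact h List.mem_cons_self)]
    exact ih (fun hm => h (List.mem_cons_of_mem _ hm)) _

theorem occ_split {c : Char} (j : Nat) (t : List Char) (b : Int)
    (hj : t[j]? = some c) (hmin : ∀ i < j, t[i]? ≠ some c) :
    occ c t b = (b + j) :: occ c (t.drop (j + 1)) (b + j + 1) := by
  induction j generalizing t b with
  | zero =>
    cases t with
    | nil => simp at hj
    | cons a t => simp_all [occ]
  | succ j ih =>
    cases t with
    | nil => simp at hj
    | cons a t =>
      have ha : a ≠ c := by
        intro h; exact hmin 0 (Nat.succ_pos _) (by simp [h])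
      simp only [occ, if_neg ha]
      rw [ih t (b + 1) (by simpa using hj)
        (fun i hi => by simpa using hmin (i + 1) (Nat.succ_lt_succ hi))]
      rw [List.drop_succ_cons]
      congr 1
      · push_cast; ring
      · congr 1
        push_cast; ring

theorem singleton_prefix_iff (c : Char) (v : List Char) : [c] <+: v ↔ v.head? = some c := by
  cases v <;> simp [List.cons_prefix_cons, eq_comm]

-- ===== A side: the while-loop collects occ =====
theorem findLoopA_eq (s : List Char) (c : Char) :
    ∀ (fuel k : Nat), k ≤ s.length → s.length - k < fuel →
      findLoopA s [c] (k : Int) fuel = occ c (s.drop k) k := by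
  intro fuel
  induction fuel with
  | zero => intro k _ h; omega
  | succ fuel ih =>
    intro k hk hfuel
    rw [findLoopA]
    rw [PySem.Chars.findFrom_natCast s [c] k hk]
    by_cases hf : PySem.Chars.find (s.drop k) [c] = -1
    · rw [if_neg (by simp [hf])]
      have : c ∉ s.drop k := by
        rw [PySem.Chars.find_eq_neg_one_iff] at hf
        simpa [List.singleton_infix_iff] using hf
      rw [occ_of_not_mem this]
    · have hpos : 0 ≤ PySem.Chars.find (s.drop k) [c] := by
        have := PySem.Chars.neg_one_le_find (s.drop k) [c]
        omega
      obtain ⟨hpre, hmin⟩ := PySem.Chars.find_spec hpos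
      set j := (PySem.Chars.find (s.drop k) [c]).toNat with hjdef
      have hcast : (PySem.Chars.find (s.drop k) [c]) = (j : Int) :=
        (Int.toNat_of_nonneg hpos).symm
      have hjget : (s.drop k)[j]? = some c := by
        rw [← List.head?_drop]
        exact (singleton_prefix_iff _ _).1 hpre
      have hminget : ∀ i < j, (s.drop k)[i]? ≠ some c := by
        intro i hi hget
        exact hmin i hi ((singleton_prefix_iff _ _).2 (by rw [List.head?_drop]; exact hget))
      have hjlt : j < s.length - k := by
        have := List.getElem?_eq_some_iff.1 hjget
        simpa using this.1
      have hcond : (if PySem.Chars.find (s.drop k) [c] = -1 then (-1 : Int)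
          else (k : Int) + PySem.Chars.find (s.drop k) [c]) ≠ -1 := by
        rw [if_neg hf]
        omega
      rw [if_pos hcond, if_neg hf, hcast]
      show ((k : Int) + (j : Int)) :: findLoopA s [c] ((k : Int) + (j : Int) + 1) fuel
          = occ c (List.drop k s) (k : Int)
      rw [occ_split j _ _ hjget hminget]
      have hrec : ((k : Int) + j) + 1 = ((k + j + 1 : Nat) : Int) := by push_cast; ring
      rw [hrec, ih (k + j + 1) (by omega) (by omega)]
      rw [List.drop_drop]
      have e3 : k + j + 1 = k + (j + 1) := by omega
      rw [e3]

-- ===== B side: splitting the fold state =====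
def dstepB (d : PySem.Dict Char (List Int)) (ic : Int × Char) : PySem.Dict Char (List Int) :=
  if punctsB.contains ic.2 then d.insert ic.2 (d.getD ic.2 [] ++ [ic.1]) else d

def lstepB (p : Nat × Bool) (ic : Int × Char) : Nat × Bool :=
  if punctsB.contains ic.2 then p
  else if p.2 && (ic.2 == ' ') then (p.1 + 1, p.2)
  else (p.1, false)

theorem stepB_eq :
    (fun (st : PySem.Dict Char (List Int) × Nat × Bool) (ic : Int × Char) =>
      if punctsB.contains ic.2 then
        (st.1.insert ic.2 (st.1.getD ic.2 [] ++ [ic.1]), st.2)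
      else if st.2.2 && (ic.2 == ' ') then (st.1, (st.2.1 + 1, st.2.2))
      else (st.1, (st.2.1, false)))
    = fun st ic => (dstepB st.1 ic, lstepB st.2 ic) := by
  funext st ic
  rcases st with ⟨d, n, bf⟩
  simp only [dstepB, lstepB]
  split_ifs <;> rfl

theorem enumerate_cons (a : Char) (t : List Char) (b : Int) :
    PySem.List.enumerate (a :: t) b = (b, a) :: PySem.List.enumerate t (b + 1) := by
  simp [PySem.List.enumerate]

theorem dict_fold_getD (c : Char) (hc : punctsB.contains c = true) :
    ∀ (t : List Char) (b : Int) (d : PySem.Dict Char (List Int)),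
      ((PySem.List.enumerate t b).foldl dstepB d).getD c [] = d.getD c [] ++ occ c t b := by
  intro t
  induction t with
  | nil => intro b d; simp [PySem.List.enumerate, occ]
  | cons a t ih =>
    intro b d
    rw [enumerate_cons, List.foldl_cons, ih]
    show (dstepB d (b, a)).getD c [] ++ occ c t (b + 1) = d.getD c [] ++ occ c (a :: t) b
    by_cases hac : a = c
    · subst hac
      simp only [dstepB, hc, if_pos, occ]
      rw [PySem.Dict.getD_insert]
      simp
    · simp only [dstepB, occ, if_neg hac]
      by_cases hca : punctsB.contains a = true
      · simp only [hca, if_pos]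
        rw [PySem.Dict.getD_insert]
        rw [if_neg (by exact fun h => hac h.symm)]
      · rw [if_neg hca]

-- ===== B side: the leading-space counter =====
def nonPunct (a : Char) : Bool := !punctsB.contains a

theorem lead_fold_false (t : List Char) : ∀ (b : Int) (n : Nat),
    (PySem.List.enumerate t b).foldl lstepB (n, false) = (n, false) := by
  induction t with
  | nil => intro b n; simp [PySem.List.enumerate]
  | cons a t ih =>
    intro b n
    rw [enumerate_cons, List.foldl_cons]
    show (PySem.List.enumerate t (b+1)).foldl lstepB (lstepB (n, false) (b, a)) = (n, false)
    have : lstepB (n, false) (b, a) = (n, false) := by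
      simp only [lstepB]; split_ifs <;> simp_all
    rw [this, ih]

theorem lead_fold (t : List Char) : ∀ (b : Int) (n : Nat),
    (PySem.List.enumerate t b).foldl lstepB (n, true) =
      (n + ((t.filter nonPunct).takeWhile (fun a => a == ' ')).length,
       (t.filter nonPunct).all (fun a => a == ' ')) := by
  induction t with
  | nil => intro b n; simp [PySem.List.enumerate]
  | cons a t ih =>
    intro b n
    rw [enumerate_cons, List.foldl_cons]
    by_cases hca : punctsB.contains a = true
    · have h1 : lstepB (n, true) (b, a) = (n, true) := by
        simp only [lstepB]
        rw [if_pos hca]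
      have hnp : nonPunct a = false := by unfold nonPunct; rw [hca]; rfl
      have h2 : (a :: t).filter nonPunct = t.filter nonPunct := by
        simp [hnp]
      rw [h1, ih, h2]
    · have hca' : punctsB.contains a = false := by
        cases h : punctsB.contains a with
        | false => rfl
        | true => exact absurd h hca
      have hnp : nonPunct a = true := by unfold nonPunct; rw [hca']; rfl
      have h2 : (a :: t).filter nonPunct = a :: t.filter nonPunct := by
        simp [hnp]
      rw [h2]
      by_cases hsp : a = ' '
      · have h1 : lstepB (n, true) (b, a) = (n + 1, true) := by
          simp only [lstepB]
          rw [if_neg hca]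
          simp [hsp]
        rw [h1, ih]
        simp [hsp]
        omega
      · have h1 : lstepB (n, true) (b, a) = (n, false) := by
          simp only [lstepB]
          rw [if_neg hca]
          simp [hsp]
        rw [h1, lead_fold_false]
        simp [hsp]
-- ===== caption: chained replaces = one filter =====
theorem replace_go_filter (c : Char) : ∀ (fuel : Nat) (l acc : List Char), l.length ≤ fuel →
    PySem.Chars.replace.go [c] [] fuel l acc = acc.reverse ++ l.filter (fun a => a != c) := by
  intro fuel
  induction fuel with
  | zero =>
    intro l acc h
    have : l = [] := by cases l <;> simp_all
    subst this
    simp [PySem.Chars.replace.go]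
  | succ fuel ih =>
    intro l acc h
    cases l with
    | nil => simp [PySem.Chars.replace.go]
    | cons a t =>
      by_cases hac : c = a
      · subst hac
        have : PySem.Chars.replace.go [c] [] (fuel + 1) (c :: t) acc
            = PySem.Chars.replace.go [c] [] fuel t acc := by
          simp [PySem.Chars.replace.go, List.isPrefixOf]
        rw [this, ih t acc (by simpa using h)]
        simp
      · have : PySem.Chars.replace.go [c] [] (fuel + 1) (a :: t) acc
            = PySem.Chars.replace.go [c] [] fuel t (a :: acc) := by
          simp [PySem.Chars.replace.go, List.isPrefixOf, hac]
        rw [this, ih t (a :: acc) (by simpa using h)]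
        simp [Ne.symm hac]
theorem replace_filter (c : Char) (l : List Char) :
    PySem.Chars.replace l [c] [] = l.filter (fun a => a != c) := by
  rw [PySem.Chars.replace]
  simp only [List.isEmpty_cons, if_false, Bool.false_eq_true]
  exact replace_go_filter c l.length l [] le_rfl

theorem foldl_filter_chain : ∀ (L : List Char) (s : List Char),
    L.foldl (fun cap c => cap.filter (fun a => a != c)) s
      = s.filter (fun a => !L.contains a) := by
  intro L
  induction L with
  | nil => intro s; simp
  | cons c L ih =>
    intro s
    rw [List.foldl_cons, ih, List.filter_filter]
    apply List.filter_congr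
    intro a _
    by_cases h1 : a = c <;> by_cases h2 : a ∈ L <;> simp [h1, h2]

-- punctsA is exactly punctsB rendered as one-char strings
theorem punctsA_toList : punctsA.map String.toList = punctsB.map (fun c => [c]) := by decide

theorem leadZerosA_eq (l : List Char) :
    leadZerosA l = List.replicate ((l.takeWhile (fun a => a == ' ')).length) 0 := by
  induction l with
  | nil => rfl
  | cons a t ih =>
    by_cases hsp : a = ' '
    · subst hsp
      simp [leadZerosA, ih, List.replicate_succ]
    · simp [leadZerosA, hsp]

-- ===== VERDICT (by name: the statement is the Claim_ definition above) =====
theorem findall_puncts_spec : Claim_equal_findall_puncts := by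
  intro text _
  show findall_puncts text = findall_puncts_alt text
  simp only [findall_puncts, findall_puncts_alt]
  rw [stepB_eq, PySem.List.foldl_prod_mk, lead_fold]
  set s := text.toList with hs
  have hres : punctsA.foldl (fun res p => res ++ findLoopA s p.toList 0 (s.length + 1)) []
      = punctsB.foldl (fun res p =>
          res ++ ((PySem.List.enumerate s).foldl dstepB PySem.Dict.empty).getD p []) [] := by
    calc punctsA.foldl (fun res p => res ++ findLoopA s p.toList 0 (s.length + 1)) []
        = (punctsA.map String.toList).foldl
            (fun res q => res ++ findLoopA s q 0 (s.length + 1)) [] :=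
            (List.foldl_map (f := String.toList)
              (g := fun res q => res ++ findLoopA s q 0 (s.length + 1))
              (l := punctsA) (init := [])).symm
      _ = (punctsB.map (fun c => [c])).foldl
            (fun res q => res ++ findLoopA s q 0 (s.length + 1)) [] := by rw [punctsA_toList]
      _ = punctsB.foldl (fun res c => res ++ findLoopA s [c] 0 (s.length + 1)) [] :=
            List.foldl_map (f := fun c => [c])
              (g := fun res q => res ++ findLoopA s q 0 (s.length + 1))
              (l := punctsB) (init := [])
      _ = punctsB.foldl (fun res p =>
            res ++ ((PySem.List.enumerate s).foldl dstepB PySem.Dict.empty).getD p []) [] := by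
          apply PySem.List.foldl_congr_mem
          intro acc c hcmem
          have hc : punctsB.contains c = true := by
            simpa [List.contains_iff_mem] using hcmem
          have h1 : findLoopA s [c] 0 (s.length + 1) = occ c s 0 := by
            have := findLoopA_eq s c (s.length + 1) 0 (Nat.zero_le _) (by omega)
            simpa using this
          have h2 : ((PySem.List.enumerate s).foldl dstepB PySem.Dict.empty).getD c []
              = occ c s 0 := by
            rw [dict_fold_getD c hc]
            simp [PySem.Dict.getD, PySem.Dict.get?, PySem.Dict.empty]
          rw [h1, h2]
  have hcap : punctsA.foldl (fun cap p => PySem.Chars.replace cap p.toList []) s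
      = s.filter nonPunct := by
    calc punctsA.foldl (fun cap p => PySem.Chars.replace cap p.toList []) s
        = (punctsA.map String.toList).foldl
            (fun cap q => PySem.Chars.replace cap q []) s :=
            (List.foldl_map (f := String.toList)
              (g := fun cap q => PySem.Chars.replace cap q [])
              (l := punctsA) (init := s)).symm
      _ = (punctsB.map (fun c => [c])).foldl
            (fun cap q => PySem.Chars.replace cap q []) s := by rw [punctsA_toList]
      _ = punctsB.foldl (fun cap c => PySem.Chars.replace cap [c] []) s :=
            List.foldl_map (f := fun c => [c])
              (g := fun cap q => PySem.Chars.replace cap q [])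
              (l := punctsB) (init := s)
      _ = punctsB.foldl (fun cap c => cap.filter (fun a => a != c)) s := by
          apply PySem.List.foldl_congr_mem
          intro acc c _
          exact replace_filter c acc
      _ = s.filter (fun a => !punctsB.contains a) := foldl_filter_chain punctsB s
      _ = s.filter nonPunct := rfl
  rw [hres, hcap, leadZerosA_eq]
  simp
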